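-- pv_equiv track=rewrite | github.com/LenaSofia/Programacion_en_Python_UNSAM | Notas/02_Estructuras_y_Funciones/ejercicios/Entregas/diccionario_geringoso.py | geringosear
-- ===== SOURCE A (Python) =====
-- def geringosear(claves):
--
--     diccionario = {}
--
--     for clave in claves:
--         valor = ''
--         for letra in clave:
--             valor += letra
--             if letra in 'AaEeIiOoUu':
--                 valor += 'p' + letra.lower()
--         diccionario[clave] = valor
--
--     return diccionario
-- ===== SOURCE B (Python) =====
-- def geringosear(claves):
--     # Segment-based geringoso: scan each word for vowel positions and emit whole
--     # slices between vowels plus the 'p'+lowercase-vowel insertion, joined at the end.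
--     def ger(palabra):
--         partes = []
--         inicio = 0
--         for i, letra in enumerate(palabra):
--             if letra in 'AaEeIiOoUu':
--                 partes.append(palabra[inicio:i + 1])
--                 partes.append('p' + letra.lower())
--                 inicio = i + 1
--         partes.append(palabra[inicio:])
--         return ''.join(partes)
--
--     return {clave: ger(clave) for clave in claves}
-- ===== Notes on version B (the rewrite author's own statement) =====
-- stated objective: alternative
-- what changed: A grows the translated word one character at a time with a per-character append and conditional suffix; B instead scans for vowel positions and copies whole slices of the original word between vowels, appending the 'p'+lowercase insertion per vowel and joining the collected segments once at the end, with the dict built by a comprehension.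
import Mathlib
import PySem

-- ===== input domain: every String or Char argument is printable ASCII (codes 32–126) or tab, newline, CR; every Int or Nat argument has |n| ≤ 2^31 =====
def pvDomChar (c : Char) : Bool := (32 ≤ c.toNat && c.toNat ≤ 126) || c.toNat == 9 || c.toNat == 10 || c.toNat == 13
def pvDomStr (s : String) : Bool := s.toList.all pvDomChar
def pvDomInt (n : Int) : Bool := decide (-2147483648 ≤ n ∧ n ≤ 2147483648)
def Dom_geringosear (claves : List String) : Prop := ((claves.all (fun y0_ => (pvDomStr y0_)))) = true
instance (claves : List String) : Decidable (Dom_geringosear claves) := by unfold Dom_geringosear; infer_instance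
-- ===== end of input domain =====

-- B replaces A's per-character accumulator (append each char, conditionally append 'p'+lower)
-- by a segment scan: it records vowel positions, copies whole slices of the word between vowels
-- plus the insertions, and joins the collected segments once (alternative; same asymptotic cost).

-- ===== PORT A =====
-- inner loop: valor = ''; for letra in clave: valor += letra; if letra in 'AaEeIiOoUu': valor += 'p' + letra.lower()
-- ('letra in "AaEeIiOoUu"' tests a single character, so it is exactly list membership)
def geringosearValor (clave : List Char) : List Char :=
  clave.foldl (fun valor letra =>
    let valor1 := valor ++ [letra]
    if letra ∈ "AaEeIiOoUu".toList then valor1 ++ ['p', PySem.Chars.lowerChar letra]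
    else valor1) []

def geringosear (claves : List String) : List (String × String) :=
  (claves.foldl (fun diccionario clave =>
      diccionario.insert clave (String.ofList (geringosearValor clave.toList)))
    PySem.Dict.empty).items

-- ===== PORT B =====
-- for i, letra in enumerate(palabra): if letra in vowels: partes += [palabra[inicio:i+1], 'p'+letra.lower()]; inicio = i+1
-- (the enumerate loop is transcribed as recursion on the remaining characters with the
--  explicit index counter i; slices are PySem.List.slice on the whole word)
def gerLoop (w : List Char) : List Char → Nat → List (List Char) → Nat → List Char
  | [], _, partes, inicio =>
      -- partes.append(palabra[inicio:]); return ''.join(partes)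
      PySem.Chars.join [] (partes ++ [PySem.List.slice w (some (inicio : Int)) none])
  | letra :: rest, i, partes, inicio =>
      if letra ∈ "AaEeIiOoUu".toList then
        gerLoop w rest (i + 1)
          (partes ++ [PySem.List.slice w (some (inicio : Int)) (some ((i : Int) + 1)),
                      ['p', PySem.Chars.lowerChar letra]])
          (i + 1)
      else
        gerLoop w rest (i + 1) partes inicio

def gerAltWord (w : List Char) : List Char := gerLoop w w 0 [] 0

-- {clave: ger(clave) for clave in claves}
def geringosear_alt (claves : List String) : List (String × String) :=
  (claves.foldl (fun d clave => d.insert clave (String.ofList (gerAltWord clave.toList)))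
    PySem.Dict.empty).items

-- ===== PRECONDITION & SPEC =====
def Spec_geringosear (claves : List String) (out : List (String × String)) : Prop := out = geringosear_alt claves
instance (claves : List String) (out : List (String × String)) : Decidable (Spec_geringosear claves out) := by unfold Spec_geringosear; infer_instance

-- ===== CLAIM (what is proved, stated in full; the proofs are below) =====
def Claim_equal_geringosear : Prop := ∀ (claves : List String), Dom_geringosear claves → Spec_geringosear claves (geringosear claves)

-- ===== LEMMAS AND PROOFS =====

-- the expansion of one character
def gchar (c : Char) : List Char :=
  if c ∈ "AaEeIiOoUu".toList then [c, 'p', PySem.Chars.lowerChar c] else [c]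

-- ''.join with empty separator is concatenation
lemma join_empty_flatten (l : List (List Char)) : PySem.Chars.join [] l = l.flatten := by
  induction l with
  | nil => simp [PySem.Chars.join_nil]
  | cons p rest ih =>
    cases rest with
    | nil => simp [PySem.Chars.join_singleton]
    | cons q t =>
      rw [PySem.Chars.join_cons_cons]
      simp [ih]

lemma flatMap_nonvowel (l : List Char) (h : ∀ c ∈ l, c ∉ "AaEeIiOoUu".toList) :
    l.flatMap gchar = l := by
  induction l with
  | nil => rfl
  | cons c t ih =>
    rw [List.flatMap_cons, gchar, if_neg (h c (List.mem_cons_self))]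
    simp [ih (fun c hc => h c (List.mem_cons_of_mem _ hc))]

lemma valor_eq_flatMap (cs : List Char) : geringosearValor cs = cs.flatMap gchar := by
  have h : ∀ acc : List Char,
      cs.foldl (fun valor letra =>
        let valor1 := valor ++ [letra]
        if letra ∈ "AaEeIiOoUu".toList then valor1 ++ ['p', PySem.Chars.lowerChar letra]
        else valor1) acc = acc ++ cs.flatMap gchar := by
    induction cs with
    | nil => intro acc; simp
    | cons c t ih =>
      intro acc
      have hstep : (let valor1 := acc ++ [c];
          if c ∈ "AaEeIiOoUu".toList then valor1 ++ ['p', PySem.Chars.lowerChar c]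
          else valor1) = acc ++ gchar c := by
        simp only [gchar]; split_ifs <;> simp
      rw [List.foldl_cons, ih, hstep, List.flatMap_cons, List.append_assoc]
  exact h []

lemma gerLoop_correct (w : List Char) : ∀ (rest : List Char) (i inicio : Nat)
    (partes : List (List Char)),
    inicio ≤ i → rest = w.drop i →
    partes.flatten = (w.take inicio).flatMap gchar →
    (∀ c ∈ (w.take i).drop inicio, c ∉ "AaEeIiOoUu".toList) →
    gerLoop w rest i partes inicio = w.flatMap gchar := by
  intro rest
  induction rest with
  | nil =>
    intro i inicio partes hle hdrop hflat hnv
    have hlen : w.length ≤ i := by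
      by_contra h
      have := List.drop_eq_nil_iff.mp hdrop.symm
      omega
    have htake : w.take i = w := List.take_of_length_le hlen
    rw [htake] at hnv
    rw [gerLoop, join_empty_flatten, List.flatten_append, hflat,
      PySem.List.slice_from_natCast]
    calc (w.take inicio).flatMap gchar ++ [w.drop inicio].flatten
        = (w.take inicio).flatMap gchar ++ (w.drop inicio).flatMap gchar := by
          rw [flatMap_nonvowel _ hnv]; simp
      _ = w.flatMap gchar := by rw [← List.flatMap_append, List.take_append_drop]
  | cons letra t ih =>
    intro i inicio partes hle hdrop hflat hnv
    have hi : i < w.length := by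
      by_contra h
      rw [List.drop_eq_nil_iff.mpr (by omega)] at hdrop
      simp at hdrop
    have hcons : w[i] :: w.drop (i + 1) = w.drop i := List.getElem_cons_drop hi
    rw [← hdrop] at hcons
    have hletra : letra = w[i] := (List.cons.injEq _ _ _ _ ▸ hcons.symm).1
    have ht : t = w.drop (i + 1) := (List.cons.injEq _ _ _ _ ▸ hcons.symm).2
    -- the untouched segment between inicio and i
    set seg := (w.take i).drop inicio with hseg
    have htake_s : w.take (i + 1) = w.take i ++ [letra] := by
      rw [List.take_add_one, hletra]
      simp [hi]
    have hsplit : w.take i = w.take inicio ++ seg := by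
      conv_lhs => rw [← List.take_append_drop inicio (w.take i)]
      rw [List.take_take, min_eq_left hle]
    have hseg_slice : (w.drop inicio).take (i + 1 - inicio) = seg ++ [letra] := by
      have : (w.take (i + 1)).drop inicio = (w.drop inicio).take (i + 1 - inicio) :=
        List.drop_take ..
      rw [← this, htake_s, List.drop_append_of_le_length (by
        simpa [List.length_take] using by omega : inicio ≤ (w.take i).length)]
    rw [gerLoop]
    by_cases hv : letra ∈ "AaEeIiOoUu".toList
    · rw [if_pos hv]
      apply ih (i + 1) (i + 1) _ (le_refl _) ht
      · have hb : ((i : Int) + 1) = ((i + 1 : Nat) : Int) := by push_cast; ring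
        rw [hb, PySem.List.slice_natCast]
        rw [List.flatten_append, hflat]
        rw [show ([(w.drop inicio).take (i + 1 - inicio),
              ['p', PySem.Chars.lowerChar letra]] : List (List Char)).flatten
            = (w.drop inicio).take (i + 1 - inicio) ++ ['p', PySem.Chars.lowerChar letra] by simp]
        rw [hseg_slice, htake_s, List.flatMap_append, hsplit, List.flatMap_append]
        rw [flatMap_nonvowel seg hnv]
        simp only [List.flatMap_cons, List.flatMap_nil, gchar, if_pos hv]
        simp
      · intro c hc
        simp at hc
    · rw [if_neg hv]
      apply ih (i + 1) inicio partes (by omega) ht hflat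
      intro c hc
      have : (w.take (i + 1)).drop inicio = seg ++ [letra] := by
        have : (w.take (i + 1)).drop inicio = (w.drop inicio).take (i + 1 - inicio) :=
          List.drop_take ..
        rw [this, hseg_slice]
      rw [this] at hc
      rcases List.mem_append.mp hc with h | h
      · exact hnv c h
      · rw [List.mem_singleton.mp h]; exact hv

lemma gerAltWord_eq (w : List Char) : gerAltWord w = w.flatMap gchar := by
  apply gerLoop_correct w w 0 0 [] (le_refl _) rfl rfl
  intro c hc; simp at hc

-- ===== VERDICT (by name: the statement is the Claim_ definition above) =====
theorem geringosear_spec : Claim_equal_geringosear := by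
  intro claves _
  unfold Spec_geringosear geringosear geringosear_alt
  have hf : (fun (d : PySem.Dict String String) (clave : String) =>
        d.insert clave (String.ofList (gerAltWord clave.toList)))
      = fun d clave => d.insert clave (String.ofList (geringosearValor clave.toList)) := by
    funext d k; rw [gerAltWord_eq, valor_eq_flatMap]
  rw [hf]
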